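-- pv_equiv track=rewrite | github.com/xcube-dev/xcube | xcube/core/chunk.py | compute_chunk_slices
-- ===== SOURCE A (Python) =====
-- import itertools
-- from collections.abc import Iterable, Iterator
--
-- def compute_chunk_slices(chunks: tuple[tuple[int, ...], ...]) -> Iterable:
--     chunk_indices = []
--     for c in chunks:
--         chunk_indices.append(tuple(i for i in range(len(c))))
--
--     chunk_slices = []
--     for c in chunks:
--         x = []
--         o = 0
--         for s in c:
--             x.append((o, o + s))
--             o += s
--         chunk_slices.append(tuple(x))
--
--     return zip(itertools.product(*chunk_indices), itertools.product(*chunk_slices))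
-- ===== SOURCE B (Python) =====
-- import itertools
--
--
-- def compute_chunk_slices(chunks: tuple[tuple[int, ...], ...]):
--     dims = []
--     for c in chunks:
--         pairs = []
--         o = 0
--         for i, s in enumerate(c):
--             pairs.append((i, (o, o + s)))
--             o += s
--         dims.append(pairs)
--     for combo in itertools.product(*dims):
--         yield tuple(p[0] for p in combo), tuple(p[1] for p in combo)
-- ===== Notes on version B (the rewrite author's own statement) =====
-- stated objective: simpler
-- what changed: One running-offset pass per dimension builds (index, slice) pairs and a single itertools.product is unzipped per combination, replacing A's two parallel per-dimension loops, two products and a zip.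
import Mathlib
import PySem

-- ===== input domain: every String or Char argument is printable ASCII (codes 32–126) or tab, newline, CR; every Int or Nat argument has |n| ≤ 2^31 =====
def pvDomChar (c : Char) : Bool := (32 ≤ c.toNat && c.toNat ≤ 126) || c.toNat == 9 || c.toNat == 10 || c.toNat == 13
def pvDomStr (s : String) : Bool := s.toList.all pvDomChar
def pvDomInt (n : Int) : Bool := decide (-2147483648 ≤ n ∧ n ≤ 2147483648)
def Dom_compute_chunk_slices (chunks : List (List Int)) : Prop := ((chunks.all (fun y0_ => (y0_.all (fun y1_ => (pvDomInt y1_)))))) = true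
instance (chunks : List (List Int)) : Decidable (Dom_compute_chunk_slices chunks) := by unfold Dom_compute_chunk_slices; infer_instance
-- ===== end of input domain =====

-- B replaces A's two parallel per-dimension loops and two zipped products by one
-- running-offset pass building (index, slice) pairs and a single product (objective: simpler decomposition).


-- ===== PORT A =====
-- itertools.product(*ls): shared library helper, used by both ports
def pyProduct {α : Type} (ls : List (List α)) : List (List α) :=
  ls.foldr (fun l acc => l.flatMap (fun x => acc.map (x :: ·))) [[]]

-- A's inner slice loop body: x.append((o, o+s)); o += s
def csStep (p : List (Int × Int) × Int) (s : Int) : List (Int × Int) × Int :=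
  (p.1 ++ [(p.2, p.2 + s)], p.2 + s)

def compute_chunk_slices (chunks : List (List Int)) : List (List Int × (List (Int × Int))) :=
  let chunk_indices := chunks.map (fun c => PySem.List.pyRange 0 c.length 1)
  let chunk_slices := chunks.map (fun c => (c.foldl csStep ([], 0)).1)
  (pyProduct chunk_indices).zip (pyProduct chunk_slices)

-- ===== PORT B =====
-- B's single running pass: enumerate with running offset producing (i, (o, o+s)) pairs
def dimPairs : List Int → Int → Int → List (Int × (Int × Int))
  | [], _, _ => []
  | s :: rest, i, o => (i, (o, o + s)) :: dimPairs rest (i + 1) (o + s)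

def compute_chunk_slices_alt (chunks : List (List Int)) : List (List Int × (List (Int × Int))) :=
  (pyProduct (chunks.map (fun c => dimPairs c 0 0))).map
    (fun combo => (combo.map Prod.fst, combo.map Prod.snd))

-- ===== PRECONDITION & SPEC =====
def Spec_compute_chunk_slices (chunks : List (List Int)) (out : List (List Int × (List (Int × Int)))) : Prop := out = compute_chunk_slices_alt chunks
instance (chunks : List (List Int)) (out : List (List Int × (List (Int × Int)))) : Decidable (Spec_compute_chunk_slices chunks out) := by unfold Spec_compute_chunk_slices; infer_instance

-- ===== CLAIM (what is proved, stated in full; the proofs are below) =====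
def Claim_equal_compute_chunk_slices : Prop := ∀ (chunks : List (List Int)), Dom_compute_chunk_slices chunks → Spec_compute_chunk_slices chunks (compute_chunk_slices chunks)

-- ===== LEMMAS AND PROOFS =====

-- recursive form of A's slice loop
def sliceRec : List Int → Int → List (Int × Int)
  | [], _ => []
  | s :: rest, o => (o, o + s) :: sliceRec rest (o + s)

theorem foldl_csStep (c : List Int) (acc : List (Int × Int)) (o : Int) :
    (c.foldl csStep (acc, o)).1 = acc ++ sliceRec c o := by
  induction c generalizing acc o with
  | nil => simp [sliceRec]
  | cons s rest ih => simp [csStep, sliceRec, ih]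

theorem dimPairs_fst (c : List Int) (i o : Int) :
    (dimPairs c i o).map Prod.fst = PySem.List.pyRange i (i + c.length) 1 := by
  induction c generalizing i o with
  | nil => simp [dimPairs, PySem.List.pyRange_one_eq_nil (le_refl i)]
  | cons s rest ih =>
    have h : i < i + ((s :: rest).length : Int) := by
      simp only [List.length_cons]; push_cast; omega
    have h2 : (i + 1) + (rest.length : Int) = i + ((s :: rest).length : Int) := by
      simp only [List.length_cons]; push_cast; ring
    rw [PySem.List.pyRange_one_cons h]
    simp only [dimPairs, List.map_cons, ih, h2]

theorem dimPairs_snd (c : List Int) (i o : Int) :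
    (dimPairs c i o).map Prod.snd = sliceRec c o := by
  induction c generalizing i o with
  | nil => rfl
  | cons s rest ih => simp [dimPairs, sliceRec, ih]

theorem zip_flatMap {α β γ : Type} (l : List γ) (f : γ → List α) (g : γ → List β)
    (h : ∀ x ∈ l, (f x).length = (g x).length) :
    (l.flatMap f).zip (l.flatMap g) = l.flatMap (fun x => (f x).zip (g x)) := by
  induction l with
  | nil => rfl
  | cons a l ih =>
    simp only [List.flatMap_cons]
    rw [List.zip_append (h a (by simp)), ih (fun x hx => h x (by simp [hx]))]

theorem length_pyProduct {α : Type} (ls : List (List α)) :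
    (pyProduct ls).length = (ls.map List.length).prod := by
  induction ls with
  | nil => rfl
  | cons l ls ih =>
    simp [pyProduct, List.length_flatMap] at *
    simp [ih]

theorem unzip_pyProduct {α β : Type} (ls : List (List (α × β))) :
    (pyProduct ls).map (fun l => (l.map Prod.fst, l.map Prod.snd)) =
      (pyProduct (ls.map (List.map Prod.fst))).zip (pyProduct (ls.map (List.map Prod.snd))) := by
  induction ls with
  | nil => rfl
  | cons a ls ih =>
    have hlen : (pyProduct (ls.map (List.map Prod.fst))).length
        = (pyProduct (ls.map (List.map Prod.snd))).length := by
      simp [length_pyProduct, Function.comp_def]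
    simp only [pyProduct, List.foldr_cons, List.map_cons] at *
    rw [List.flatMap_map, List.flatMap_map]
    rw [zip_flatMap _ _ _ (fun x _ => by simp [hlen])]
    rw [List.map_flatMap]
    congr 1
    funext x
    rw [List.zip_map, ← ih]
    simp [Function.comp_def, Prod.map, List.map_map]

-- ===== VERDICT (by name: the statement is the Claim_ definition above) =====
theorem compute_chunk_slices_spec : Claim_equal_compute_chunk_slices := by
  intro chunks _
  unfold Spec_compute_chunk_slices compute_chunk_slices compute_chunk_slices_alt
  rw [unzip_pyProduct]
  simp only [List.map_map]
  congr 1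
  · refine congrArg pyProduct (List.map_congr_left fun c _ => ?_)
    simp [dimPairs_fst]
  · refine congrArg pyProduct (List.map_congr_left fun c _ => ?_)
    simp [dimPairs_snd, foldl_csStep]
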